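-- pv_equiv track=rewrite | github.com/qianliu013/leetcode | easy/594.py | _solve
-- ===== SOURCE A (Python) =====
-- import collections
--
-- def _solve(nums):
--     result = collections.defaultdict(int)
--     result_reduce1 = collections.defaultdict(int)
--     for num in nums:
--         result[num] += 1
--         result_reduce1[num - 1] += 1
--     ans = 0
--     for num in result:
--         if num in result_reduce1:
--             ans = max(ans, result[num] + result_reduce1[num])
--     return ans
-- ===== SOURCE B (Python) =====
-- def _solve(nums):
--     xs = sorted(nums)
--     n = len(xs)
--     ans = 0
--     prev = None  # (value, count) of the previous run of equal values
--     i = 0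
--     while i < n:
--         j = i
--         while j < n and xs[j] == xs[i]:
--             j += 1
--         c = j - i
--         if prev is not None and xs[i] - prev[0] == 1:
--             ans = max(ans, prev[1] + c)
--         prev = (xs[i], c)
--         i = j
--     return ans
-- ===== Notes on version B (the rewrite author's own statement) =====
-- stated objective: alternative
-- what changed: Replaces A's two defaultdict counters and key scan by sorting a copy of the list and doing one linear scan over runs of equal values, combining adjacent runs whose values differ by 1.
import Mathlib
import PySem

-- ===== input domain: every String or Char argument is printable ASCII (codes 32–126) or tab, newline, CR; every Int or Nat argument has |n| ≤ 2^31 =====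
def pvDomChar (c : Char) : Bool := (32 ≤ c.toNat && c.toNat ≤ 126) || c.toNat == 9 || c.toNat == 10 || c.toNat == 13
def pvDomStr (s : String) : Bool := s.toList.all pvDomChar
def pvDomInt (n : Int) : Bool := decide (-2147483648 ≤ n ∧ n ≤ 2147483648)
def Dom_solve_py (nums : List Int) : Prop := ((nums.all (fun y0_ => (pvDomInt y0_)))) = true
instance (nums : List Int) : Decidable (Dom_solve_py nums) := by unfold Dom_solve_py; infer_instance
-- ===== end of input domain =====

-- B replaces A's two hash-map passes by sort-then-scan over runs of equal values (alternative algorithm, not claimed faster).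

-- ===== PORT A =====
-- two defaultdict(int) counters built in one loop, then a max over the first dict's keys
def solve_py (nums : List Int) : Int :=
  let p := nums.foldl
    (fun (st : PySem.Dict Int Int × PySem.Dict Int Int) num =>
      (st.1.modify num 0 (· + 1), st.2.modify (num - 1) 0 (· + 1)))
    (PySem.Dict.empty, PySem.Dict.empty)
  p.1.keys.foldl
    (fun ans num =>
      if p.2.contains num then max ans (p.1.getD num 0 + p.2.getD num 0) else ans)
    0

-- ===== PORT B =====
-- the outer while-loop of Source B: each step consumes one run of equal values of the sorted list
def runsLoop (ans : Int) (prev : Option (Int × Int)) (xs : List Int) : Int :=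
  match xs with
  | [] => ans
  | v :: rest =>
    let c : Int := 1 + (rest.takeWhile (fun y => y == v)).length
    let ans' :=
      match prev with
      | some (pv, pc) => if v - pv = 1 then max ans (pc + c) else ans
      | none => ans
    runsLoop ans' (some (v, c)) (rest.dropWhile (fun y => y == v))
termination_by xs.length
decreasing_by
  have := List.length_dropWhile_le (fun y => y == v) rest
  simp only [List.length_cons]; omega

def solve_py_alt (nums : List Int) : Int :=
  runsLoop 0 none (PySem.List.sorted nums (fun x => x) false)

-- ===== PRECONDITION & SPEC =====
def Spec_solve_py (nums : List Int) (out : Int) : Prop := out = solve_py_alt nums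
instance (nums : List Int) (out : Int) : Decidable (Spec_solve_py nums out) := by unfold Spec_solve_py; infer_instance

-- ===== CLAIM (what is proved, stated in full; the proofs are below) =====
def Claim_equal_solve_py : Prop := ∀ (nums : List Int), Dom_solve_py nums → Spec_solve_py nums (solve_py nums)

-- ===== LEMMAS AND PROOFS =====

-- the common value both programs compute: a fold of "count x + count (x+1) when x+1 occurs"
def step (L : List Int) (a x : Int) : Int :=
  if x + 1 ∈ L then max a ((L.count x : Int) + (L.count (x + 1) : Int)) else a

-- first elements of the runs of a (sorted) list
def dvals : List Int → List Int
  | [] => []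
  | v :: rest => v :: dvals (rest.dropWhile (fun y => y == v))
termination_by xs => xs.length
decreasing_by
  have := List.length_dropWhile_le (fun y => y == v) rest
  simp only [List.length_cons]; omega

lemma mem_of_mem_dvals {x : Int} : ∀ {l : List Int}, x ∈ dvals l → x ∈ l := by
  intro l
  induction l using dvals.induct with
  | case1 => simp [dvals]
  | case2 v rest ih =>
    intro h
    rw [dvals] at h
    rcases List.mem_cons.1 h with h | h
    · simp [h]
    · exact List.mem_cons_of_mem v ((rest.dropWhile_sublist (p := fun y => y == v)).mem (ih h))

lemma lt_of_mem_dropWhile {v : Int} : ∀ {rest : List Int}, rest.Pairwise (· ≤ ·) →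
    (∀ y ∈ rest, v ≤ y) → ∀ y ∈ rest.dropWhile (fun z => z == v), v < y := by
  intro rest
  induction rest with
  | nil => simp
  | cons a t ih =>
    intro hs hle y hy
    rw [List.dropWhile_cons] at hy
    by_cases hav : a = v
    · simp only [hav, beq_self_eq_true, if_true] at hy
      exact ih hs.of_cons (fun z hz => hav ▸ (List.pairwise_cons.1 hs).1 z hz) y hy
    · simp only [beq_iff_eq, hav, if_false] at hy
      have hva : v < a := lt_of_le_of_ne (hle a (by simp)) (Ne.symm hav)
      rcases List.mem_cons.1 hy with h | h
      · omega
      · exact lt_of_lt_of_le hva ((List.pairwise_cons.1 hs).1 y h)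

lemma count_head_sorted {v : Int} {rest : List Int} (hs : (v :: rest).Pairwise (· ≤ ·)) :
    ((v :: rest).count v : Int) = 1 + ((rest.takeWhile (fun y => y == v)).length : Int) := by
  have hle : ∀ y ∈ rest, v ≤ y := (List.pairwise_cons.1 hs).1
  have hd0 : (rest.dropWhile (fun y => y == v)).count v = 0 := by
    rw [List.count_eq_zero]
    intro hmem
    exact absurd rfl (ne_of_gt (lt_of_mem_dropWhile hs.of_cons hle v hmem))
  have ht : (rest.takeWhile (fun y => y == v)).count v = (rest.takeWhile (fun y => y == v)).length := by
    rw [List.count_eq_length]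
    intro b hb
    have hbv := List.mem_takeWhile_imp hb
    simp only [beq_iff_eq] at hbv
    omega
  have hsplit : rest.count v = (rest.takeWhile (fun y => y == v)).count v + (rest.dropWhile (fun y => y == v)).count v := by
    conv_lhs => rw [← List.takeWhile_append_dropWhile (p := fun y => y == v) (l := rest)]
    rw [List.count_append]
  rw [List.count_cons_self, hsplit, ht, hd0]
  push_cast
  ring

lemma count_gt_sorted {v x : Int} {rest : List Int} (_hs : (v :: rest).Pairwise (· ≤ ·))
    (hx : v < x) : (v :: rest).count x = (rest.dropWhile (fun y => y == v)).count x := by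
  have ht : (rest.takeWhile (fun y => y == v)).count x = 0 := by
    rw [List.count_eq_zero]
    intro hmem
    have := List.mem_takeWhile_imp hmem
    simp only [beq_iff_eq] at this
    omega
  rw [List.count_cons_of_ne (by omega)]
  conv_lhs => rw [← List.takeWhile_append_dropWhile (p := fun y => y == v) (l := rest)]
  rw [List.count_append, ht, Nat.zero_add]

lemma mem_gt_sorted {v x : Int} {rest : List Int} (_hs : (v :: rest).Pairwise (· ≤ ·))
    (hx : v < x) : x ∈ v :: rest ↔ x ∈ rest.dropWhile (fun y => y == v) := by
  constructor
  · intro h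
    rcases List.mem_cons.1 h with h | h
    · omega
    · conv at h => rw [← List.takeWhile_append_dropWhile (p := fun y => y == v) (l := rest)]
      rcases List.mem_append.1 h with h | h
      · have := List.mem_takeWhile_imp h
        simp only [beq_iff_eq] at this
        omega
      · exact h
  · intro h
    exact List.mem_cons_of_mem v ((rest.dropWhile_sublist (p := fun y => y == v)).mem h)

lemma mem_dvals_iff {x : Int} : ∀ {l : List Int}, l.Pairwise (· ≤ ·) → (x ∈ dvals l ↔ x ∈ l) := by
  intro l
  induction l using dvals.induct with
  | case1 => simp [dvals]
  | case2 v rest ih =>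
    intro hs
    rw [dvals]
    by_cases hxv : x = v
    · simp [hxv]
    · have hsub : (rest.dropWhile (fun y => y == v)).Pairwise (· ≤ ·) :=
        ((rest.dropWhile_sublist (p := fun y => y == v)).trans (List.sublist_cons_self v rest)) |> (hs.sublist ·)
      simp only [List.mem_cons, hxv, false_or, ih hsub]
      conv_rhs => rw [← List.takeWhile_append_dropWhile (p := fun y => y == v) (l := rest)]
      rw [List.mem_append]
      constructor
      · exact Or.inr
      · rintro (h | h)
        · have := List.mem_takeWhile_imp h
          simp only [beq_iff_eq] at this
          exact absurd this hxv
        · exact h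

lemma nodup_dvals : ∀ {l : List Int}, l.Pairwise (· ≤ ·) → (dvals l).Nodup := by
  intro l
  induction l using dvals.induct with
  | case1 => simp [dvals]
  | case2 v rest ih =>
    intro hs
    have hsub : (rest.dropWhile (fun y => y == v)).Pairwise (· ≤ ·) :=
      ((rest.dropWhile_sublist (p := fun y => y == v)).trans (List.sublist_cons_self v rest)) |> (hs.sublist ·)
    rw [dvals]
    refine List.nodup_cons.2 ⟨?_, ih hsub⟩
    intro hmem
    have hvv := lt_of_mem_dropWhile hs.of_cons (List.pairwise_cons.1 hs).1 v (mem_of_mem_dvals hmem)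
    omega

lemma runsLoop_eq : ∀ (ans : Int) (prev : Option (Int × Int)) (ys : List Int),
    ys.Pairwise (· ≤ ·) →
    (∀ pv pc, prev = some (pv, pc) → ∀ y ∈ ys, pv < y) →
    runsLoop ans prev ys =
      (dvals ys).foldl (step ys)
        (match prev with
         | none => ans
         | some (pv, pc) => if pv + 1 ∈ ys then max ans (pc + (ys.count (pv + 1) : Int)) else ans) := by
  intro ans prev ys
  induction ans, prev, ys using runsLoop.induct with
  | case1 ans prev =>
    intro _ _
    cases prev with
    | none => simp [runsLoop, dvals]
    | some p => simp [runsLoop, dvals]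
  | case2 ans prev v rest c ans' ih =>
    simp only [ans', c] at ih
    clear_value ans' c
    clear ans' c
    intro hs hprev
    have hle : ∀ y ∈ rest, v ≤ y := (List.pairwise_cons.1 hs).1
    have hgt : ∀ y ∈ rest.dropWhile (fun y => y == v), v < y :=
      lt_of_mem_dropWhile hs.of_cons hle
    have hsub : (rest.dropWhile (fun y => y == v)).Pairwise (· ≤ ·) :=
      ((rest.dropWhile_sublist (p := fun y => y == v)).trans (List.sublist_cons_self v rest)) |> (hs.sublist ·)
    have h2 : ∀ pv pc, (some (v, 1 + ((rest.takeWhile (fun y => y == v)).length : Int)) : Option (Int × Int)) = some (pv, pc) →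
        ∀ y ∈ rest.dropWhile (fun y => y == v), pv < y := by
      intro pv pc hp y hy
      cases hp
      exact hgt y hy
    have hc : ((v :: rest).count v : Int) = 1 + ((rest.takeWhile (fun y => y == v)).length : Int) :=
      count_head_sorted hs
    have hc1 : (v :: rest).count (v + 1) = (rest.dropWhile (fun y => y == v)).count (v + 1) :=
      count_gt_sorted hs (by omega)
    have hm1 : v + 1 ∈ v :: rest ↔ v + 1 ∈ rest.dropWhile (fun y => y == v) :=
      mem_gt_sorted hs (by omega)
    have hkey : ∀ b : Int, step (v :: rest) b v =
        if v + 1 ∈ rest.dropWhile (fun y => y == v) then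
          max b ((1 + ((rest.takeWhile (fun y => y == v)).length : Int)) +
            ((rest.dropWhile (fun y => y == v)).count (v + 1) : Int))
        else b := by
      intro b
      simp only [step, hc, hc1]
      exact if_congr hm1 rfl rfl
    have hcongr : ∀ b : Int,
        (dvals (rest.dropWhile (fun y => y == v))).foldl (step (rest.dropWhile (fun y => y == v))) b =
        (dvals (rest.dropWhile (fun y => y == v))).foldl (step (v :: rest)) b := by
      intro b
      refine PySem.List.foldl_congr_mem _ _ _ _ ?_
      intro acc x hx
      have hxd := mem_of_mem_dvals hx
      have hvx : v < x := hgt x hxd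
      simp only [step, count_gt_sorted hs hvx, count_gt_sorted hs (show v < x + 1 by omega)]
      exact (if_congr (mem_gt_sorted hs (by omega)) rfl rfl).symm
    cases prev with
    | none =>
      simp only [] at ih
      have hrun : runsLoop ans none (v :: rest) =
          runsLoop ans (some (v, 1 + ((rest.takeWhile (fun y => y == v)).length : Int)))
            (rest.dropWhile (fun y => y == v)) := by rw [runsLoop.eq_def]
      rw [hrun, dvals, List.foldl_cons, ih hsub h2, hcongr]
      congr 1
      exact (hkey ans).symm
    | some p =>
      obtain ⟨pv, pc⟩ := p
      simp only [] at ih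
      have hpv : ∀ y ∈ v :: rest, pv < y := hprev pv pc rfl
      have hiff : pv + 1 ∈ v :: rest ↔ v - pv = 1 := by
        constructor
        · intro hmem
          have h1 : pv < v := hpv v (by simp)
          rcases List.mem_cons.1 hmem with h | h
          · omega
          · have := hle _ h
            have := hpv _ (List.mem_cons_of_mem v h)
            omega
        · intro hv
          have hveq : pv + 1 = v := by omega
          simp [hveq]
      have hInit : (if pv + 1 ∈ v :: rest then max ans (pc + ((v :: rest).count (pv + 1) : Int)) else ans)
          = (if v - pv = 1 then max ans (pc + (1 + ((rest.takeWhile (fun y => y == v)).length : Int))) else ans) := by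
        by_cases hv : v - pv = 1
        · have hveq : pv + 1 = v := by omega
          rw [if_pos (hiff.2 hv), if_pos hv, hveq, hc]
        · rw [if_neg (fun h => hv (hiff.1 h)), if_neg hv]
      have hrun : runsLoop ans (some (pv, pc)) (v :: rest) =
          runsLoop (if v - pv = 1 then max ans (pc + (1 + ((rest.takeWhile (fun y => y == v)).length : Int))) else ans)
            (some (v, 1 + ((rest.takeWhile (fun y => y == v)).length : Int)))
            (rest.dropWhile (fun y => y == v)) := by rw [runsLoop.eq_def]
      simp only [dite_eq_ite] at ih
      refine (hrun.trans (ih hsub h2)).trans ?_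
      rw [hcongr, dvals, List.foldl_cons]
      congr 1
      rw [show (match (some (pv, pc) : Option (Int × Int)) with
           | none => ans
           | some (pv, pc) => if pv + 1 ∈ v :: rest then max ans (pc + ((v :: rest).count (pv + 1) : Int)) else ans)
          = (if v - pv = 1 then max ans (pc + (1 + ((rest.takeWhile (fun y => y == v)).length : Int))) else ans) from hInit]
      exact (hkey _).symm

lemma count_map_sub_one (nums : List Int) (x : Int) :
    (nums.map (fun y => y - 1)).count x = nums.count (x + 1) := by
  induction nums with
  | nil => rfl
  | cons a t ih =>
    by_cases h : a = x + 1
    · simp [ih, h]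
    · simp [List.count_cons, ih, h]
      omega

lemma step_sorted (nums : List Int) :
    step (PySem.List.sorted nums (fun x => x) false) = step nums := by
  have hperm := PySem.List.sorted_perm nums (fun x => x) false
  funext a x
  simp only [step, hperm.count_eq, hperm.mem_iff]

lemma solve_py_alt_eq (nums : List Int) :
    solve_py_alt nums = (dvals (PySem.List.sorted nums (fun x => x) false)).foldl (step nums) 0 := by
  have hs : (PySem.List.sorted nums (fun x => x) false).Pairwise (· ≤ ·) :=
    PySem.List.sorted_pairwise nums (fun x => x)
  rw [solve_py_alt, runsLoop_eq 0 none _ hs (by intro pv pc h; cases h), step_sorted]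

lemma solve_py_eq (nums : List Int) :
    solve_py nums = (PySem.Set.ofList nums).foldl (step nums) 0 := by
  rw [solve_py]
  rw [PySem.List.foldl_prod_mk
    (f := fun (d : PySem.Dict Int Int) num => d.modify num 0 (· + 1))
    (g := fun (d : PySem.Dict Int Int) num => d.modify (num - 1) 0 (· + 1))]
  have hr : nums.foldl (fun (d : PySem.Dict Int Int) num => d.modify num 0 (· + 1)) PySem.Dict.empty
      = PySem.Dict.counter nums := rfl
  have hr1 : nums.foldl (fun (d : PySem.Dict Int Int) num => d.modify (num - 1) 0 (· + 1)) PySem.Dict.empty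
      = PySem.Dict.counter (nums.map (fun y => y - 1)) := by
    rw [PySem.Dict.counter_eq_foldl, List.foldl_map]
  simp only [hr, hr1, PySem.Dict.keys_counter]
  refine PySem.List.foldl_congr_mem _ _ _ _ ?_
  intro acc x hx
  have hcont : (PySem.Dict.counter (nums.map (fun y => y - 1))).contains x = ((x + 1) ∈ nums : Bool) := by
    rw [PySem.Dict.contains_counter]
    have hmm : (x ∈ nums.map (fun y => y - 1)) ↔ (x + 1 ∈ nums) := by
      simp only [List.mem_map]
      constructor
      · rintro ⟨a, ha, rfl⟩
        have hae : a - 1 + 1 = a := by omega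
        rwa [hae]
      · intro h
        exact ⟨x + 1, h, by omega⟩
    simp [hmm]
  rw [hcont, PySem.Dict.getD_counter, PySem.Dict.getD_counter, count_map_sub_one, step]
  by_cases h : x + 1 ∈ nums
  · simp [h]
  · simp [h]

-- ===== VERDICT (by name: the statement is the Claim_ definition above) =====
theorem solve_py_spec : Claim_equal_solve_py := by
  intro nums _
  unfold Spec_solve_py
  rw [solve_py_eq, solve_py_alt_eq]
  have hs : (PySem.List.sorted nums (fun x => x) false).Pairwise (· ≤ ·) :=
    PySem.List.sorted_pairwise nums (fun x => x)
  have hperm : (PySem.Set.ofList nums).Perm (dvals (PySem.List.sorted nums (fun x => x) false)) := by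
    refine (List.perm_ext_iff_of_nodup (PySem.Set.nodup_ofList nums) (nodup_dvals hs)).2 ?_
    intro a
    rw [PySem.Set.mem_ofList, mem_dvals_iff hs, (PySem.List.sorted_perm nums (fun x => x) false).mem_iff]
  letI : RightCommutative (step nums) := ⟨by
    intro b a1 a2
    simp only [step]
    split_ifs <;> omega⟩
  exact hperm.foldl_eq 0
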